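-- pv_equiv track=rewrite | github.com/flo-bou/adventofcode24 | day6/day6_part1.py | to_South
-- ===== SOURCE A (Python) =====
-- def to_South(carte: list, guard_position: list):
--     # trouver le prochain '#' dans la direction de déplacement du garde
--     positions_traveled: set = set()
--     after_guard: bool = False
--     final_guard_position: list = list()
--     for line_index, line in enumerate(carte):
--         # trouver la ligne du garde
--         if line_index == guard_position[0]:
--             after_guard = True
--         if after_guard:
--             if line[guard_position[1]] == '#':
--                 final_guard_position = [line_index-1, guard_position[1]]
--                 break
--             else:
--                 positions_traveled.add((line_index, guard_position[1]))
--     # # si aucun '#' n'a été atteint, alors le garde est sorti de la carte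
--     # if final_guard_position == []:
--     #     final_guard_position = None
--     return final_guard_position, "West", positions_traveled
-- ===== SOURCE B (Python) =====
-- def to_South(carte: list, guard_position: list):
--     # Collect ALL obstacle rows in the guard's column at/below the guard (no break,
--     # no flag), then take the minimum; traveled cells are a range comprehension.
--     row = guard_position[0]
--     if not (0 <= row < len(carte)):
--         return [], "West", set()
--     col = guard_position[1]
--     obstacles = [r for r in range(row, len(carte)) if carte[r][col] == '#']
--     if not obstacles:
--         return [], "West", {(r, col) for r in range(row, len(carte))}
--     m = min(obstacles)
--     return [m - 1, col], "West", {(r, col) for r in range(row, m)}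
-- ===== Notes on version B (the rewrite author's own statement) =====
-- stated objective: alternative
-- what changed: A scans with an after_guard flag, accumulating the traveled set and breaking at the first '#'; B never searches for a first match: it filters the whole column below the guard into a list of ALL obstacle rows, takes min() of that list, and enumerates the traveled cells as a range comprehension.
-- outside the precondition, e.g. on to_South([], []): A returns ([], 'West', set()), B raises IndexError; on to_South([['#'], []], [0, 0]): A returns ([-1, 0], 'West', set()), B raises IndexError
import Mathlib
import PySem

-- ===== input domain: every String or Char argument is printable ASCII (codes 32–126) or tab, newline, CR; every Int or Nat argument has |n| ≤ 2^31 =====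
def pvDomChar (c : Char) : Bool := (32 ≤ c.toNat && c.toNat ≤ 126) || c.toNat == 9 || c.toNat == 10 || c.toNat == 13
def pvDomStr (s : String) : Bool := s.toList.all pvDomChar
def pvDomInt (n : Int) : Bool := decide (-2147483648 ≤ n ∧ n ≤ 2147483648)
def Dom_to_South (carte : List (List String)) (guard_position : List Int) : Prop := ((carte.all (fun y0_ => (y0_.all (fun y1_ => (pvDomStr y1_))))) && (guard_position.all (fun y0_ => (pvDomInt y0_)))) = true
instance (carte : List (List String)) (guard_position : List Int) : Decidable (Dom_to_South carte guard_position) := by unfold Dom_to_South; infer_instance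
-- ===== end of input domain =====

-- B replaces A's flag-and-break scan by a filter of ALL obstacle rows in the
-- column followed by min(); the traveled cells become a range comprehension
-- (objective: alternative decomposition; same cost).

-- ===== PORT A =====
-- the enumerate-loop of A with its break, carried state (after_guard, traveled set)
def to_South_loop (g0 g1 : Int) : Nat → List (List String) → Bool → List (Int × Int) → List Int × List (Int × Int)
  | _, [], _, s => ([], s)
  | i, line :: rest, after, s =>
    let after' := after || ((Int.ofNat i) == g0)
    if after' then
      if (PySem.List.pyGet? line g1).getD "" == "#" then (([Int.ofNat i - 1, g1] : List Int), s)
      else to_South_loop g0 g1 (i+1) rest true (PySem.Set.add s (Int.ofNat i, g1))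
    else to_South_loop g0 g1 (i+1) rest false s

def to_South (carte : List (List String)) (guard_position : List Int) : List Int × String × (List (Int × Int)) :=
  let g0 := (PySem.List.pyGet? guard_position 0).getD 0
  let g1 := (PySem.List.pyGet? guard_position 1).getD 0
  let r := to_South_loop g0 g1 0 carte false PySem.Set.empty
  (r.1, "West", r.2)

-- ===== PORT B =====
def to_South_alt (carte : List (List String)) (guard_position : List Int) : List Int × String × (List (Int × Int)) :=
  let row := (PySem.List.pyGet? guard_position 0).getD 0
  if 0 ≤ row ∧ row < (carte.length : Int) then
    let col := (PySem.List.pyGet? guard_position 1).getD 0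
    -- obstacles = [r for r in range(row, len(carte)) if carte[r][col] == '#']
    let obstacles := (PySem.List.pyRange row (carte.length : Int) 1).filter
        (fun r => (PySem.List.pyGet? ((PySem.List.pyGet? carte r).getD []) col).getD "" == "#")
    match PySem.List.min? obstacles (fun x => x) with
    | none =>
        (([] : List Int), "West",
          PySem.Set.ofList ((PySem.List.pyRange row (carte.length : Int) 1).map (fun r => (r, col))))
    | some m =>
        (([m - 1, col] : List Int), "West",
          PySem.Set.ofList ((PySem.List.pyRange row m 1).map (fun r => (r, col))))
  else ([], "West", PySem.Set.empty)

-- ===== PRECONDITION & SPEC =====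
-- Pre_ excludes inputs where Python A raises an IndexError, and the empty guard_position (on
-- which A returns only when carte is empty, its loop never touching guard_position[0], while
-- B's up-front row read raises): an empty guard_position, or a
-- guard row inside the map with guard_position lacking a column, or the column index out of
-- range for some line at or below the guard row.  (The last conjunct is slightly wider than
-- A's actual raising set: a too-short line strictly below the first '#' is never reached by
-- A, but B's whole-column filter does reach it and raises — see the cites in claim.json.)
def Pre_to_South (carte : List (List String)) (guard_position : List Int) : Prop :=
  guard_position ≠ [] ∧
  (0 ≤ (PySem.List.pyGet? guard_position 0).getD 0 →
   (PySem.List.pyGet? guard_position 0).getD 0 < (carte.length : Int) →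
   2 ≤ guard_position.length ∧
   ∀ line ∈ carte.drop ((PySem.List.pyGet? guard_position 0).getD 0).toNat,
     PySem.Raise.InRange line.length ((PySem.List.pyGet? guard_position 1).getD 0))
instance (carte : List (List String)) (guard_position : List Int) : Decidable (Pre_to_South carte guard_position) := by unfold Pre_to_South; infer_instance

def pvWitness_to_South : List (List String) × List Int := ([[".", "."], ["#", "."]], [0, 0])

def Spec_to_South (carte : List (List String)) (guard_position : List Int) (out : List Int × String × (List (Int × Int))) : Prop := out = to_South_alt carte guard_position
instance (carte : List (List String)) (guard_position : List Int) (out : List Int × String × (List (Int × Int))) : Decidable (Spec_to_South carte guard_position out) := by unfold Spec_to_South; infer_instance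

-- ===== CLAIM (what is proved, stated in full; the proofs are below) =====
def Claim_equal_to_South : Prop := ∀ (carte : List (List String)) (guard_position : List Int), Dom_to_South carte guard_position → Pre_to_South carte guard_position → Spec_to_South carte guard_position (to_South carte guard_position)

-- ===== LEMMAS AND PROOFS =====

-- first obstacle at or after row i in a suffix of the map (proof-side characterisation of
-- where A's break fires; used to bridge the two ports)
def findObstacle (col : Int) : Nat → List (List String) → Option Nat
  | _, [] => none
  | r, line :: rest =>
    if (PySem.List.pyGet? line col).getD "" == "#" then some r else findObstacle col (r+1) rest

theorem findObstacle_ge (col : Int) : ∀ (rows : List (List String)) (i ob : Nat),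
    findObstacle col i rows = some ob → i ≤ ob := by
  intro rows
  induction rows with
  | nil => intro i ob h; simp [findObstacle] at h
  | cons line rest ih =>
    intro i ob h
    by_cases hc : (PySem.List.pyGet? line col).getD "" == "#"
    · simp [findObstacle, hc] at h; omega
    · simp [findObstacle, hc] at h
      have := ih (i+1) ob h
      omega

-- the after-phase of A's loop equals find-then-enumerate
theorem loop_after (g0 g1 : Int) : ∀ (rows : List (List String)) (i : Nat) (s : List (Int × Int)),
    to_South_loop g0 g1 i rows true s =
      (match findObstacle g1 i rows with
       | some ob => ((([(ob : Int) - 1, g1]) : List Int),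
           List.foldl PySem.Set.add s
             ((PySem.List.pyRange (i : Int) (ob : Int) 1).map (fun r => (r, g1))))
       | none => (([] : List Int),
           List.foldl PySem.Set.add s
             ((PySem.List.pyRange (i : Int) ((i + rows.length : Nat) : Int) 1).map (fun r => (r, g1))))) := by
  intro rows
  induction rows with
  | nil =>
    intro i s
    simp [to_South_loop, findObstacle, PySem.List.pyRange_one_eq_nil]
  | cons line rest ih =>
    intro i s
    by_cases hc : (PySem.List.pyGet? line g1).getD "" == "#"
    · simp [to_South_loop, findObstacle, hc, PySem.List.pyRange_one_eq_nil]
    · have hstep : to_South_loop g0 g1 i (line :: rest) true s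
          = to_South_loop g0 g1 (i+1) rest true (PySem.Set.add s (Int.ofNat i, g1)) := by
        simp [to_South_loop, hc]
      have hfind : findObstacle g1 i (line :: rest) = findObstacle g1 (i+1) rest := by
        simp [findObstacle, hc]
      rw [hstep, hfind, ih]
      cases hfo : findObstacle g1 (i+1) rest with
      | some ob =>
        have hge : i + 1 ≤ ob := findObstacle_ge g1 rest (i+1) ob hfo
        dsimp only
        rw [PySem.List.pyRange_one_cons (by exact_mod_cast hge : (i : Int) < (ob : Int))]
        have hc1 : ((i : Int)) + 1 = ((i + 1 : Nat) : Int) := by push_cast; ring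
        rw [hc1, List.map_cons, List.foldl_cons]
        simp [Int.ofNat_eq_natCast]
      | none =>
        dsimp only
        have hlt : (i : Int) < ((i + (line :: rest).length : Nat) : Int) := by
          simp only [List.length_cons]; omega
        rw [PySem.List.pyRange_one_cons hlt]
        have hc1 : ((i : Int)) + 1 = ((i + 1 : Nat) : Int) := by push_cast; ring
        have hc2 : (((i + (line :: rest).length : Nat)) : Int) = (((i + 1) + rest.length : Nat) : Int) := by
          simp only [List.length_cons]; omega
        rw [hc1, hc2, List.map_cons, List.foldl_cons]
        simp [Int.ofNat_eq_natCast]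

-- before the guard row the loop only advances
theorem loop_skip (g0 g1 : Int) : ∀ (k : Nat) (rows : List (List String)) (i : Nat) (s : List (Int × Int)),
    (∀ j : Nat, j < k → Int.ofNat (i + j) ≠ g0) →
    to_South_loop g0 g1 i rows false s = to_South_loop g0 g1 (i + k) (rows.drop k) false s := by
  intro k
  induction k with
  | zero => intro rows i s _; simp
  | succ k ih =>
    intro rows i s h
    cases rows with
    | nil => simp [to_South_loop]
    | cons line rest =>
      have h0 : Int.ofNat i ≠ g0 := by have := h 0 (by omega); simpa using this
      have hbe : ((Int.ofNat i) == g0) = false := by simpa using h0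
      simp only [to_South_loop, hbe, Bool.or_false, if_false, Bool.false_eq_true, List.drop_succ_cons]
      rw [ih rest (i+1) s (by intro j hj; have := h (j+1) (by omega); convert this using 2; omega)]
      have : i + 1 + k = i + (k + 1) := by omega
      rw [this]

-- at the guard row, after_guard flips to true
theorem loop_at (g0 g1 : Int) (k : Nat) (hk : Int.ofNat k = g0) (rows : List (List String)) (s : List (Int × Int)) :
    to_South_loop g0 g1 k rows false s = to_South_loop g0 g1 k rows true s := by
  cases rows with
  | nil => rfl
  | cons line rest =>
    have hk2 : (k : Int) = g0 := by exact_mod_cast hk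
    simp [to_South_loop, hk2]

-- the head of B's filtered column is exactly the first obstacle A's break stops at
theorem head_filter_eq_findObstacle (carte : List (List String)) (col : Int) :
    ∀ (k : Nat), k ≤ carte.length →
    (((PySem.List.pyRange (k : Int) (carte.length : Int) 1).filter
        (fun r => (PySem.List.pyGet? ((PySem.List.pyGet? carte r).getD []) col).getD "" == "#")).head?)
      = (findObstacle col k (carte.drop k)).map (fun n => (n : Int)) := by
  intro k hk
  induction hn : carte.length - k generalizing k with
  | zero =>
    have hke : k = carte.length := by omega
    subst hke
    rw [PySem.List.pyRange_one_eq_nil (by omega), List.drop_length]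
    rfl
  | succ n ih =>
    have hklt : k < carte.length := by omega
    rw [PySem.List.pyRange_one_cons (by exact_mod_cast hklt)]
    have hdrop : carte.drop k = carte[k] :: carte.drop (k+1) := by
      rw [List.drop_eq_getElem_cons hklt]
    have hget : (PySem.List.pyGet? carte (k : Int)).getD [] = carte[k] := by
      simp [PySem.List.pyGet?, PySem.List.pyIdx?, hklt]
    rw [hdrop]
    by_cases hc : (PySem.List.pyGet? carte[k] col).getD "" == "#"
    · have hg2 : carte[k]?.getD ([] : List String) = carte[k] := by
        simp [List.getElem?_eq_getElem hklt]
      simp [hg2, hc, findObstacle]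
    · have hstep : ((k : Int) + 1) = ((k + 1 : Nat) : Int) := by push_cast; ring
      simp only [List.filter_cons, hget, hc, if_false, Bool.false_eq_true, findObstacle, hstep]
      exact ih (k+1) (by omega) (by omega)

-- min of a strictly increasing list is its head
theorem min?_eq_head?_of_pairwise_lt (l : List Int) (h : l.Pairwise (· < ·)) :
    PySem.List.min? l (fun x => x) = l.head? := by
  cases l with
  | nil => rfl
  | cons x t =>
    rw [PySem.List.min?_id_cons]
    have hxle : ∀ y ∈ t, x ≤ y := by
      intro y hy
      exact le_of_lt ((List.pairwise_cons.mp h).1 y hy)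
    have hmem := PySem.List.foldl_min_mem t x
    have hle := (PySem.List.foldl_min_le t x).1
    rcases hmem with he | hm
    · simp [he]
    · have := hxle _ hm
      have : t.foldl min x = x := le_antisymm hle this
      simp [this]

-- ===== VERDICT (by name: the statement is the Claim_ definition above) =====
theorem to_South_spec : Claim_equal_to_South := by
  intro carte guard _hdom _hpre
  unfold Spec_to_South to_South to_South_alt
  dsimp only
  by_cases hin : 0 ≤ (PySem.List.pyGet? guard 0).getD 0 ∧
      (PySem.List.pyGet? guard 0).getD 0 < (carte.length : Int)
  · rw [if_pos hin]
    set g0 := (PySem.List.pyGet? guard 0).getD 0 with hg0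
    set g1 := (PySem.List.pyGet? guard 1).getD 0 with hg1
    set k := g0.toNat with hkdef
    have hcast : (k : Int) = g0 := Int.toNat_of_nonneg hin.1
    have hskip : to_South_loop g0 g1 0 carte false PySem.Set.empty
        = to_South_loop g0 g1 (0 + k) (carte.drop k) false PySem.Set.empty := by
      apply loop_skip
      intro j hj
      have hjk : (j : Int) < g0 := by omega
      simp only [Int.ofNat_eq_natCast, Nat.zero_add]
      omega
    rw [hskip]
    rw [Nat.zero_add, loop_at g0 g1 k (by simpa using hcast) _ _, loop_after]
    have hmin : PySem.List.min?
        ((PySem.List.pyRange g0 (carte.length : Int) 1).filter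
          (fun r => (PySem.List.pyGet? ((PySem.List.pyGet? carte r).getD []) g1).getD "" == "#"))
        (fun x => x)
        = (findObstacle g1 k (carte.drop k)).map (fun n => (n : Int)) := by
      rw [min?_eq_head?_of_pairwise_lt _
            (List.Pairwise.filter _ (PySem.List.pairwise_lt_pyRange_one g0 (carte.length : Int))),
          ← hcast, head_filter_eq_findObstacle carte g1 k (by omega)]
    rw [hmin]
    cases hfo : findObstacle g1 k (carte.drop k) with
    | some ob =>
      dsimp only [Option.map_some]
      refine Prod.ext ?_ (Prod.ext rfl ?_)
      · simp
      · show List.foldl PySem.Set.add PySem.Set.empty _ = PySem.Set.ofList _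
        rw [PySem.Set.ofList_eq_foldl, hcast]
        rfl
    | none =>
      dsimp only [Option.map_none]
      refine Prod.ext rfl (Prod.ext rfl ?_)
      show List.foldl PySem.Set.add PySem.Set.empty _ = PySem.Set.ofList _
      rw [PySem.Set.ofList_eq_foldl]
      have h1 : ((k + (carte.drop k).length : Nat) : Int) = (carte.length : Int) := by
        simp only [List.length_drop]; omega
      rw [h1, hcast]
      rfl
  · rw [if_neg hin]
    have hskip : to_South_loop ((PySem.List.pyGet? guard 0).getD 0) ((PySem.List.pyGet? guard 1).getD 0) 0 carte false PySem.Set.empty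
        = to_South_loop ((PySem.List.pyGet? guard 0).getD 0) ((PySem.List.pyGet? guard 1).getD 0) (0 + carte.length) (carte.drop carte.length) false PySem.Set.empty := by
      apply loop_skip
      intro j hj
      simp only [Int.ofNat_eq_natCast, Nat.zero_add]
      omega
    rw [hskip, List.drop_length]
    rfl
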